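-- pv_equiv track=rewrite | github.com/keguihua/autorunne | src/autorunne/core/state_engine.py | _remove_task
-- ===== SOURCE A (Python) =====
-- def _remove_task(items: list[dict[str, str]], matcher: str) -> tuple[list[dict[str, str]], str | None]:
--     lowered = matcher.strip().lower()
--     kept = []
--     matched = None
--     for item in items:
--         text = item.get("text", "").strip()
--         if not matched and lowered and lowered in text.lower():
--             matched = text
--             continue
--         kept.append(item)
--     return kept, matched
-- ===== SOURCE B (Python) =====
-- def _remove_task(items, matcher):
--     lowered = matcher.strip().lower()
--     if not lowered:
--         return list(items), None
--     for i, item in enumerate(items):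
--         text = item.get("text", "").strip()
--         if lowered in text.lower():
--             return items[:i] + items[i + 1:], text
--     return list(items), None
-- ===== Notes on version B (the rewrite author's own statement) =====
-- stated objective: simpler
-- what changed: A threads a matched flag through one accumulating pass that rebuilds the kept list item by item; B first finds the index of the first matching task (with an early guard for an empty matcher) and then rebuilds the result by slicing the item out (items[:i] + items[i+1:]).
import Mathlib
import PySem

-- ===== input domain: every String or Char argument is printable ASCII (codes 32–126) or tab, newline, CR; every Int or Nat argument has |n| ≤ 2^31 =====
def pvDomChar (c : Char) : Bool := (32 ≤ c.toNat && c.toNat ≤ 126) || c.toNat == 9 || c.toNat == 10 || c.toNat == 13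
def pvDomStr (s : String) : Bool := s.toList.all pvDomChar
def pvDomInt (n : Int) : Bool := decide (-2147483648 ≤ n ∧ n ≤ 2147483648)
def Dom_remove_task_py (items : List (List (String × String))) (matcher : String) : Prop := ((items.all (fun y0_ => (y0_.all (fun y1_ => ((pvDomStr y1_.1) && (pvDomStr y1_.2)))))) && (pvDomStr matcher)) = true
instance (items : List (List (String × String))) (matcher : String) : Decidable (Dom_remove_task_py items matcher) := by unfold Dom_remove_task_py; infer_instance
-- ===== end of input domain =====

-- B replaces A's flag-threaded accumulating pass by a find-first-match-index phase
-- followed by a slice-and-rebuild phase (objective: simpler; return value equivalence).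

-- ===== PORT A =====
-- item.get("text", "") on the association-list dict (first match, default "")
def pvGetText (item : List (String × String)) : String :=
  match item.find? (fun kv => kv.1 == "text") with
  | some kv => kv.2
  | none => ""

-- Python truthiness of `not matched` (matched : str | None)
def pvNotTruthy (m : Option String) : Bool :=
  match m with
  | none => true
  | some s => s == ""

-- one iteration of A's loop body
def pvStepA (lowered : String) (acc : List (List (String × String)) × Option String) (item : List (String × String)) : List (List (String × String)) × Option String :=
  let text := PySem.Str.strip (pvGetText item)
  if pvNotTruthy acc.2 && !(lowered == "") && PySem.Str.isIn lowered (PySem.Str.lower text)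
  then (acc.1, some text)
  else (acc.1 ++ [item], acc.2)

def remove_task_py (items : List (List (String × String))) (matcher : String) : (List (List (String × String))) × Option String :=
  let lowered := PySem.Str.lower (PySem.Str.strip matcher)
  items.foldl (pvStepA lowered) ([], none)

-- ===== PORT B =====
-- find the first index i (with start offset) whose stripped text contains lowered
def pvFindIdx (lowered : String) : List (List (String × String)) → Nat → Option (Nat × String)
  | [], _ => none
  | item :: rest, i =>
    let text := PySem.Str.strip (pvGetText item)
    if PySem.Str.isIn lowered (PySem.Str.lower text) then some (i, text)
    else pvFindIdx lowered rest (i + 1)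

def remove_task_py_alt (items : List (List (String × String))) (matcher : String) : (List (List (String × String))) × Option String :=
  let lowered := PySem.Str.lower (PySem.Str.strip matcher)
  if lowered == "" then (items, none)
  else
    match pvFindIdx lowered items 0 with
    | none => (items, none)
    | some (i, text) =>
      (PySem.List.slice items none (some (i : Int)) ++ PySem.List.slice items (some ((i : Int) + 1)) none, some text)

-- ===== PRECONDITION & SPEC =====
def Spec_remove_task_py (items : List (List (String × String))) (matcher : String) (out : (List (List (String × String))) × Option String) : Prop := out = remove_task_py_alt items matcher
instance (items : List (List (String × String))) (matcher : String) (out : (List (List (String × String))) × Option String) : Decidable (Spec_remove_task_py items matcher out) := by unfold Spec_remove_task_py; infer_instance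

-- ===== CLAIM (what is proved, stated in full; the proofs are below) =====
def Claim_equal_remove_task_py : Prop := ∀ (items : List (List (String × String))) (matcher : String), Dom_remove_task_py items matcher → Spec_remove_task_py items matcher (remove_task_py items matcher)

-- ===== LEMMAS AND PROOFS =====

-- reference removal function both sides are reduced to
def pvRef (lowered : String) : List (List (String × String)) → (List (List (String × String))) × Option String
  | [] => ([], none)
  | item :: rest =>
    let text := PySem.Str.strip (pvGetText item)
    if PySem.Str.isIn lowered (PySem.Str.lower text) then (rest, some text)
    else (item :: (pvRef lowered rest).1, (pvRef lowered rest).2)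

-- a nonempty needle is not contained in the empty string
lemma pv_isIn_empty (s : String) (h : ¬ s = "") : PySem.Str.isIn s "" = false := by
  have hs : s.toList ≠ [] := by
    intro hc
    apply h
    have := (String.ofList_toList (s := s)).symm
    rw [this, hc]
  show PySem.Chars.isIn s.toList "".toList = false
  cases hl : s.toList with
  | nil => exact absurd hl hs
  | cons c t => simp [PySem.Chars.isIn, PySem.Chars.find, PySem.Chars.find.go]

-- a text containing the nonempty needle is itself nonempty
lemma pv_text_ne_empty (lowered text : String) (hl : ¬ lowered = "")
    (h : PySem.Str.isIn lowered (PySem.Str.lower text) = true) : ¬ text = "" := by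
  intro hc
  subst hc
  have hlow : PySem.Str.lower "" = "" := rfl
  rw [hlow, pv_isIn_empty lowered hl] at h
  exact Bool.false_ne_true h

-- once matched is a nonempty string, A's loop only appends
lemma pv_foldA_done (lowered s : String) (hs : ¬ s = "") :
    ∀ (items : List (List (String × String))) (k : List (List (String × String))),
    items.foldl (pvStepA lowered) (k, some s) = (k ++ items, some s) := by
  intro items
  induction items with
  | nil => intro k; simp
  | cons it rest ih =>
    intro k
    have hnt : pvNotTruthy (some s) = false := by
      simp [pvNotTruthy]; exact fun hc => absurd hc hs
    have hstep : pvStepA lowered (k, some s) it = (k ++ [it], some s) := by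
      simp [pvStepA, hnt]
    rw [List.foldl_cons, hstep, ih (k ++ [it])]
    simp

-- with an empty matcher A's loop keeps everything
lemma pv_foldA_empty (lowered : String) (hl : lowered = "") :
    ∀ (items : List (List (String × String))) (k : List (List (String × String))),
    items.foldl (pvStepA lowered) (k, none) = (k ++ items, none) := by
  intro items
  induction items with
  | nil => intro k; simp
  | cons it rest ih =>
    intro k
    have hstep : pvStepA lowered (k, none) it = (k ++ [it], none) := by
      simp [pvStepA, hl]
    rw [List.foldl_cons, hstep, ih (k ++ [it])]
    simp

-- A's loop computes pvRef (nonempty matcher)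
lemma pv_foldA_ref (lowered : String) (hl : ¬ lowered = "") :
    ∀ (items : List (List (String × String))) (k : List (List (String × String))),
    items.foldl (pvStepA lowered) (k, none) = (k ++ (pvRef lowered items).1, (pvRef lowered items).2) := by
  intro items
  induction items with
  | nil => intro k; simp [pvRef]
  | cons it rest ih =>
    intro k
    by_cases hm : PySem.Chars.isIn lowered.toList (PySem.Chars.lower (PySem.Chars.strip (pvGetText it).toList)) = true
    · have hne := pv_text_ne_empty lowered (PySem.Str.strip (pvGetText it)) hl (by simpa using hm)
      have hstep : pvStepA lowered (k, none) it = (k, some (PySem.Str.strip (pvGetText it))) := by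
        simp [pvStepA, pvNotTruthy, hm, hl]
      rw [List.foldl_cons, hstep, pv_foldA_done lowered (PySem.Str.strip (pvGetText it)) hne rest k]
      simp [pvRef, hm]
    · simp only [Bool.not_eq_true] at hm
      have hstep : pvStepA lowered (k, none) it = (k ++ [it], none) := by
        simp [pvStepA, hm]
      rw [List.foldl_cons, hstep, ih (k ++ [it])]
      simp [pvRef, hm]

-- findIdx with shifted start
lemma pv_findIdx_shift (lowered : String) :
    ∀ (items : List (List (String × String))) (n : Nat),
    pvFindIdx lowered items (n + 1) = (pvFindIdx lowered items n).map (fun p => (p.1 + 1, p.2)) := by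
  intro items
  induction items with
  | nil => intro n; simp [pvFindIdx]
  | cons it rest ih =>
    intro n
    by_cases hm : PySem.Chars.isIn lowered.toList (PySem.Chars.lower (PySem.Chars.strip (pvGetText it).toList)) = true
    · simp [pvFindIdx, hm]
    · simp only [Bool.not_eq_true] at hm
      simp [pvFindIdx, hm, ih, Option.map_map]

-- B's find-then-slice computes pvRef
lemma pv_alt_ref (lowered : String) :
    ∀ (items : List (List (String × String))),
    (match pvFindIdx lowered items 0 with
     | none => (items, none)
     | some (i, text) =>
       (PySem.List.slice items none (some (i : Int)) ++ PySem.List.slice items (some ((i : Int) + 1)) none, some text))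
    = pvRef lowered items := by
  intro items
  induction items with
  | nil => simp [pvFindIdx, pvRef]
  | cons it rest ih =>
    by_cases hm : PySem.Chars.isIn lowered.toList (PySem.Chars.lower (PySem.Chars.strip (pvGetText it).toList)) = true
    · have h0 : pvFindIdx lowered (it :: rest) 0 = some (0, PySem.Str.strip (pvGetText it)) := by
        simp [pvFindIdx, hm]
      rw [h0]
      have c1 : ((0 : Nat) : Int) + 1 = ((1 : Nat) : Int) := by norm_num
      simp only [PySem.List.slice_to_natCast, c1, PySem.List.slice_from_natCast]
      simp [pvRef, hm]
    · simp only [Bool.not_eq_true] at hm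
      have h0 : pvFindIdx lowered (it :: rest) 0 = pvFindIdx lowered rest 1 := by
        simp [pvFindIdx, hm]
      rw [h0, show (1 : Nat) = 0 + 1 from rfl, pv_findIdx_shift lowered rest 0]
      cases hf : pvFindIdx lowered rest 0 with
      | none =>
        simp only [hf] at ih
        simp [pvRef, hm, ← ih]
      | some p =>
        obtain ⟨i, t⟩ := p
        simp only [Option.map_some]
        have c2 : ((i + 1 : Nat) : Int) + 1 = ((i + 2 : Nat) : Int) := by push_cast; ring
        simp only [c2, PySem.List.slice_to_natCast, PySem.List.slice_from_natCast]
        have c3 : ((i : Int)) + 1 = ((i + 1 : Nat) : Int) := by push_cast; ring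
        simp only [hf, c3, PySem.List.slice_to_natCast, PySem.List.slice_from_natCast] at ih
        simp only [pvRef]
        rw [if_neg (by simp [hm]), ← ih]
        simp [List.take_succ_cons, List.drop_succ_cons]

-- ===== VERDICT (by name: the statement is the Claim_ definition above) =====
theorem remove_task_py_spec : Claim_equal_remove_task_py := by
  intro items matcher _
  unfold Spec_remove_task_py remove_task_py remove_task_py_alt
  by_cases hl : PySem.Str.lower (PySem.Str.strip matcher) = ""
  · rw [if_pos (by simp [hl])]
    rw [pv_foldA_empty (PySem.Str.lower (PySem.Str.strip matcher)) hl items []]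
    simp
  · rw [if_neg (by simp [hl])]
    rw [pv_foldA_ref (PySem.Str.lower (PySem.Str.strip matcher)) hl items []]
    rw [← pv_alt_ref (PySem.Str.lower (PySem.Str.strip matcher)) items]
    cases hf : pvFindIdx (PySem.Str.lower (PySem.Str.strip matcher)) items 0 with
    | none => simp
    | some p => obtain ⟨i, t⟩ := p; simp
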